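-- pv_equiv track=rewrite | github.com/DawidDebkowski/sieciowe-graf | ramkowanie/package.py | remove_bit_stuffing
-- ===== SOURCE A (Python) =====
-- def remove_bit_stuffing (message):
--     """
--     Removes bit stuffing from a message. Assumes that header has been removed.
--     """
--     unstuffed_message = ''
--     count = 0
--     for bit in message:
--         if bit == '1':
--             count += 1
--             if count == 5:
--                 continue
--         else:
--             count = 0
--         unstuffed_message += bit
--     return unstuffed_message
-- ===== SOURCE B (Python) =====
-- def remove_bit_stuffing(message):
--     """
--     Removes bit stuffing from a message. Assumes that header has been removed.
--     Run-based: group the message into maximal runs of equal characters; a run of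
--     '1' with length >= 5 loses exactly one bit, every other run passes through.
--     """
--     parts = []
--     i = 0
--     n = len(message)
--     while i < n:
--         c = message[i]
--         j = i + 1
--         while j < n and message[j] == c:
--             j += 1
--         length = j - i
--         if c == '1' and length >= 5:
--             parts.append('1' * (length - 1))
--         else:
--             parts.append(c * length)
--         i = j
--     return ''.join(parts)
-- ===== Notes on version B (the rewrite author's own statement) =====
-- stated objective: alternative
-- what changed: Replaces the per-bit stateful counter with run-length grouping: scan maximal runs of equal characters and emit each run whole, dropping exactly one bit from any run of '1' of length at least 5.
import Mathlib
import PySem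

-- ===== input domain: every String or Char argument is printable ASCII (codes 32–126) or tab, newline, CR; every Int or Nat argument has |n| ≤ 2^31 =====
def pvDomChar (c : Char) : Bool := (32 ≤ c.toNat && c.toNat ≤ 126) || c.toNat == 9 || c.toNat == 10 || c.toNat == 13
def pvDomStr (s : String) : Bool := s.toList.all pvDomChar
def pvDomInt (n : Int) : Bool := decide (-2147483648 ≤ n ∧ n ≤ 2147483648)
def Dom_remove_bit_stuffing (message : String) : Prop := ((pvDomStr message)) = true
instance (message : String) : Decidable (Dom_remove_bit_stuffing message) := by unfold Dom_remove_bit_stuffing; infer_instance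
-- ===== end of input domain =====

-- B replaces A's per-bit stateful counter by run-length grouping (one bit dropped per run of '1' of length ≥ 5): an alternative decomposition, same result.


-- ===== PORT A =====
-- A's loop: state = (output so far, count of consecutive '1' bits); '1' increments
-- the count and is skipped exactly when the count reaches 5; other bits reset it.
def rbsStep (st : List Char × Int) (bit : Char) : List Char × Int :=
  if bit = '1' then
    if st.2 + 1 = 5 then (st.1, st.2 + 1) else (st.1 ++ [bit], st.2 + 1)
  else (st.1 ++ [bit], 0)

def remove_bit_stuffing (message : String) : String :=
  String.mk (message.toList.foldl rbsStep ([], 0)).1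

-- ===== PORT B =====
-- B's outer while loop: peel one maximal run of equal characters per step.
def rbsRuns : List Char → List Char
  | [] => []
  | c :: rest =>
    let len := (rest.takeWhile (· = c)).length + 1
    (if c = '1' ∧ 5 ≤ len then List.replicate (len - 1) c else List.replicate len c)
      ++ rbsRuns (rest.dropWhile (· = c))
termination_by l => l.length
decreasing_by
  simpa using Nat.lt_succ_of_le (List.length_dropWhile_le (· = c) rest)

def remove_bit_stuffing_alt (message : String) : String :=
  String.mk (rbsRuns message.toList)

-- ===== PRECONDITION & SPEC =====
def Spec_remove_bit_stuffing (message : String) (out : String) : Prop := out = remove_bit_stuffing_alt message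
instance (message : String) (out : String) : Decidable (Spec_remove_bit_stuffing message out) := by unfold Spec_remove_bit_stuffing; infer_instance

-- ===== CLAIM (what is proved, stated in full; the proofs are below) =====
def Claim_equal_remove_bit_stuffing : Prop := ∀ (message : String), Dom_remove_bit_stuffing message → Spec_remove_bit_stuffing message (remove_bit_stuffing message)

-- ===== LEMMAS AND PROOFS =====

lemma rbsStep_one (acc : List Char) (c : Int) :
    rbsStep (acc, c) '1' = if c + 1 = 5 then (acc, c + 1) else (acc ++ ['1'], c + 1) := by
  simp [rbsStep]

lemma rbsStep_ne (acc : List Char) (c : Int) (ch : Char) (h : ch ≠ '1') :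
    rbsStep (acc, c) ch = (acc ++ [ch], 0) := by
  simp [rbsStep, h]

-- A on a block of k consecutive '1' bits, starting with counter c ≥ 0:
-- the counter ends at c + k, and exactly one bit is dropped iff the counter
-- passes through 5 during the block.
lemma foldl_ones (k : Nat) (acc : List Char) (c : Int) (hc : 0 ≤ c) :
    (List.replicate k '1').foldl rbsStep (acc, c) =
      (acc ++ List.replicate (if c < 5 ∧ 5 ≤ c + k then k - 1 else k) '1', c + k) := by
  induction k generalizing acc c with
  | zero =>
    simp only [List.replicate_zero, List.foldl_nil]
    rw [if_neg (by omega)]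
    simp
  | succ n ih =>
    rw [List.replicate_succ, List.foldl_cons, rbsStep_one]
    by_cases h5 : c + 1 = 5
    · rw [if_pos h5, ih acc (c+1) (by omega), h5]
      rw [if_neg (show ¬ ((5:Int) < 5 ∧ 5 ≤ 5 + (n:Int)) by omega),
          if_pos (show c < 5 ∧ 5 ≤ c + ((n+1 : Nat) : Int) by push_cast; omega)]
      exact Prod.ext (by simp) (by push_cast; omega)
    · rw [if_neg h5, ih (acc ++ ['1']) (c+1) (by omega)]
      by_cases h2 : c + 1 < 5 ∧ 5 ≤ c + 1 + n
      · have h3 : (c < 5 ∧ 5 ≤ c + ((n+1 : Nat) : Int)) := by push_cast at h2 ⊢; omega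
        rw [if_pos h2, if_pos h3, show n + 1 - 1 = (n - 1) + 1 by omega,
            List.replicate_succ]
        exact Prod.ext (by simp) (by push_cast; omega)
      · have h3 : ¬ (c < 5 ∧ 5 ≤ c + ((n+1 : Nat) : Int)) := by push_cast at h2 ⊢; omega
        rw [if_neg h2, if_neg h3, List.replicate_succ]
        exact Prod.ext (by simp) (by push_cast; omega)

-- A on a block of k consecutive copies of a non-'1' character: all bits kept,
-- counter reset to 0 (for k ≥ 1).
lemma foldl_non_ones (k : Nat) (hk : 1 ≤ k) (ch : Char) (hch : ch ≠ '1')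
    (acc : List Char) (c : Int) :
    (List.replicate k ch).foldl rbsStep (acc, c) = (acc ++ List.replicate k ch, 0) := by
  induction k generalizing acc c with
  | zero => omega
  | succ n ih =>
    rw [List.replicate_succ, List.foldl_cons, rbsStep_ne _ _ _ hch]
    by_cases hn : n = 0
    · subst hn; simp
    · rw [ih (by omega) (acc ++ [ch]) 0]
      exact Prod.ext (by simp) rfl

lemma takeWhile_eq_replicate (c : Char) (l : List Char) :
    l.takeWhile (· = c) = List.replicate (l.takeWhile (· = c)).length c := by
  apply List.eq_replicate_of_mem
  intro b hb
  have := List.mem_takeWhile_imp hb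
  simpa using this

-- Main loop correspondence: if the counter is 0, or the next character is not
-- '1' (so the counter is reset immediately), A's fold produces B's run output.
lemma main_lemma : ∀ (n : Nat) (l : List Char) (acc : List Char) (c : Int),
    l.length ≤ n → 0 ≤ c →
    (c = 0 ∨ (∀ d ∈ l.head?, d ≠ '1')) →
    (l.foldl rbsStep (acc, c)).1 = acc ++ rbsRuns l := by
  intro n
  induction n with
  | zero =>
    intro l acc c hl _ _
    have : l = [] := List.eq_nil_of_length_eq_zero (by omega)
    subst this
    simp [rbsRuns]
  | succ m ih =>
    intro l acc c hl hc hh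
    match l with
    | [] => simp [rbsRuns]
    | ch :: rest =>
      have hsplit : ch :: rest =
          List.replicate ((rest.takeWhile (· = ch)).length + 1) ch
            ++ rest.dropWhile (· = ch) := by
        rw [List.replicate_succ, List.cons_append]
        congr 1
        conv_lhs => rw [← List.takeWhile_append_dropWhile (p := (· = ch)) (l := rest)]
        congr 1
        exact takeWhile_eq_replicate ch rest
      set k := (rest.takeWhile (· = ch)).length + 1 with hk
      have hlen : (rest.dropWhile (· = ch)).length ≤ m := by
        have h1 := List.length_dropWhile_le (· = ch) rest
        have h2 : rest.length + 1 ≤ m + 1 := by simpa using hl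
        omega
      have hheadtl : ∀ d ∈ (rest.dropWhile (· = ch)).head?, d ≠ ch := by
        intro d hd
        intro hdc
        subst hdc
        have := List.head?_dropWhile_not (p := (· = d)) rest
        rw [hd] at this
        simpa using this
      conv_lhs => rw [hsplit]
      rw [List.foldl_append]
      by_cases hone : ch = '1'
      · subst hone
        have hc0 : c = 0 := by
          rcases hh with h | h
          · exact h
          · exfalso; exact (h '1' rfl) rfl
        subst hc0
        rw [foldl_ones k acc 0 le_rfl]
        rw [ih (rest.dropWhile (· = '1')) _ (0 + (k:Int)) hlen (by positivity)
            (Or.inr (by intro d hd; exact hheadtl d hd))]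
        rw [rbsRuns]
        simp only [← hk]
        by_cases h5 : 5 ≤ k
        · rw [if_pos (show (0:Int) < 5 ∧ 5 ≤ 0 + (k:Int) by omega),
              if_pos (by exact ⟨by trivial, h5⟩), List.append_assoc]
        · rw [if_neg (show ¬ ((0:Int) < 5 ∧ 5 ≤ 0 + (k:Int)) by omega),
              if_neg (fun h => h5 h.2), List.append_assoc]
      · rw [foldl_non_ones k (by omega) ch hone acc c]
        rw [ih (rest.dropWhile (· = ch)) _ 0 hlen le_rfl (Or.inl rfl)]
        rw [rbsRuns]
        simp only [← hk]
        rw [if_neg (by intro h; exact hone h.1), List.append_assoc]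

-- ===== VERDICT (by name: the statement is the Claim_ definition above) =====
theorem remove_bit_stuffing_spec : Claim_equal_remove_bit_stuffing := by
  intro message _
  unfold Spec_remove_bit_stuffing remove_bit_stuffing remove_bit_stuffing_alt
  congr 1
  simpa using main_lemma message.toList.length message.toList [] 0 le_rfl le_rfl (Or.inl rfl)
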